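-- pv_equiv track=rewrite | github.com/wilmurillo-ai/Design-Assistant | .skills/openclaw-skills/skills/chefroger/behavior-persona/scripts/advisor.py | check_repetitive_question
-- ===== SOURCE A (Python) =====
-- def check_repetitive_question(messages: list) -> bool:
--     """Check if user asked the same question twice"""
--     if len(messages) < 2:
--         return False
--
--     # 获取最近的用户消息
--     recent_msgs = []
--     for msg in messages[-10:]:
--         if msg.get("sender") == "user":
--             recent_msgs.append(msg.get("content", "")[:50])  # 取前50字符比较
--
--     # 检查重复
--     for i in range(len(recent_msgs) - 1):
--         if recent_msgs[i] == recent_msgs[i + 1]: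
--             return True
--
--     return False
-- ===== SOURCE B (Python) =====
-- def check_repetitive_question(messages: list) -> bool:
--     """Check if user asked the same question twice"""
--     recent = [m.get("content", "")[:50] for m in messages[-10:] if m.get("sender") == "user"]
--     runs = []
--     for x in recent:
--         if not runs or runs[-1] != x:
--             runs.append(x)
--     return len(runs) < len(recent)
-- ===== Notes on version B (the rewrite author's own statement) =====
-- stated objective: alternative
-- what changed: A scans an indexed list of truncated user contents for an equal adjacent pair with an early return; B run-length-compresses the contents into a 'runs' stack (appending only when the top differs) and reports repetition iff compression shortened the list, dropping the redundant len<2 guard.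
import Mathlib
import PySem

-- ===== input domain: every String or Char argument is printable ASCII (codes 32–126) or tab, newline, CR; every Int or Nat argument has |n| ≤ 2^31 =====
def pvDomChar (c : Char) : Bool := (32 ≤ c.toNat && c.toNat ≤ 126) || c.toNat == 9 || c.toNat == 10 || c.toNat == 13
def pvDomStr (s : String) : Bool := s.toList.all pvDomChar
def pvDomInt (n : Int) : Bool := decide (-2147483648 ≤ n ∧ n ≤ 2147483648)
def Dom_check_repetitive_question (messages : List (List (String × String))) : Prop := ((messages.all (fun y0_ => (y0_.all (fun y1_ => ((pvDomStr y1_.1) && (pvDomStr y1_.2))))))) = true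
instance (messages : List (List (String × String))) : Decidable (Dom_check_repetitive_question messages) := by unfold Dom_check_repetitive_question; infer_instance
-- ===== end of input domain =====

-- B replaces A's index scan for an equal adjacent pair by a run-length compression:
-- it pushes each truncated user content onto a 'runs' stack only when it differs from the top,
-- and reports repetition iff compression shortened the list (objective: alternative).

-- ===== PORT A =====
-- msg.get("sender") == "user"
def pvIsUser (msg : List (String × String)) : Bool :=
  msg.lookup "sender" == some "user"

-- msg.get("content", "")[:50]
def pvContent50 (msg : List (String × String)) : String :=
  PySem.Str.slice ((msg.lookup "content").getD "") none (some 50)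

def check_repetitive_question (messages : List (List (String × String))) : Bool :=
  if messages.length < 2 then false
  else
    -- recent_msgs built by appending truncated user contents over messages[-10:]
    let recent : List String :=
      (PySem.List.slice messages (some (-10)) none).foldl
        (fun acc msg => if pvIsUser msg then acc ++ [pvContent50 msg] else acc) []
    -- for i in range(len(recent_msgs) - 1): early return True on a match
    (PySem.List.pyRange 0 ((recent.length : Int) - 1) 1).foldl
      (fun found i =>
        found || (PySem.List.pyGet? recent i == PySem.List.pyGet? recent (i + 1))) false

-- ===== PORT B =====
def check_repetitive_question_alt (messages : List (List (String × String))) : Bool :=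
  -- recent = [m.get("content","")[:50] for m in messages[-10:] if m.get("sender")=="user"]
  let recent : List String :=
    (PySem.List.slice messages (some (-10)) none).filterMap
      (fun m => if m.lookup "sender" == some "user"
        then some (PySem.Str.slice ((m.lookup "content").getD "") none (some 50)) else none)
  -- runs = []; for x in recent: if not runs or runs[-1] != x: runs.append(x)
  let runs : List String :=
    recent.foldl
      (fun runs x =>
        if runs.isEmpty || !(PySem.List.pyGet? runs (-1) == some x) then runs ++ [x] else runs) []
  decide (runs.length < recent.length)

-- ===== PRECONDITION & SPEC =====
def Spec_check_repetitive_question (messages : List (List (String × String))) (out : Bool) : Prop := out = check_repetitive_question_alt messages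
instance (messages : List (List (String × String))) (out : Bool) : Decidable (Spec_check_repetitive_question messages out) := by unfold Spec_check_repetitive_question; infer_instance

-- ===== CLAIM (what is proved, stated in full; the proofs are below) =====
def Claim_equal_check_repetitive_question : Prop := ∀ (messages : List (List (String × String))), Dom_check_repetitive_question messages → Spec_check_repetitive_question messages (check_repetitive_question messages)

-- ===== LEMMAS AND PROOFS =====

-- adjacent-duplicate predicate, the common characterisation of both ports
def pvAdj : List String → Bool
  | a :: b :: t => (a == b) || pvAdj (b :: t)
  | _ => false

-- number of run-starts of l after a previous element prev
def pvRuns (prev : String) : List String → Nat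
  | [] => 0
  | x :: t => (if x == prev then 0 else 1) + pvRuns x t

def pvCollect (l : List (List (String × String))) : List String :=
  l.filterMap (fun msg => if pvIsUser msg then some (pvContent50 msg) else none)

theorem pvCollect_foldl (l : List (List (String × String))) (acc : List String) :
    l.foldl (fun acc msg => if pvIsUser msg then acc ++ [pvContent50 msg] else acc) acc
      = acc ++ pvCollect l := by
  induction l generalizing acc with
  | nil => simp [pvCollect]
  | cons msg rest ih =>
    simp only [List.foldl_cons, pvCollect, List.filterMap_cons]
    by_cases h : pvIsUser msg
    · simp [h, ih, pvCollect]
    · simp [h, ih, pvCollect]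

theorem pvFoldl_or (p : Nat → Bool) (l : List Nat) (acc : Bool) :
    l.foldl (fun a k => a || p k) acc = (acc || l.any p) := by
  induction l generalizing acc with
  | nil => simp
  | cons x t ih => simp [ih, Bool.or_assoc]

theorem pvAdj_index (l : List String) :
    (List.range (l.length - 1)).any (fun k => l[k]? == l[k + 1]?) = pvAdj l := by
  match l with
  | [] => simp [pvAdj]
  | [a] => simp [pvAdj]
  | a :: b :: t =>
    have ih := pvAdj_index (b :: t)
    simp only [List.length_cons, Nat.add_sub_cancel] at *
    rw [List.range_succ_eq_map]
    simp only [List.any_cons, List.any_map]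
    simp only [List.getElem?_cons_zero, List.getElem?_cons_succ, pvAdj]
    rw [← ih]
    rfl

-- A's index scan over `recent` is the adjacent scan
theorem pvScan_eq (recent : List String) :
    (PySem.List.pyRange 0 ((recent.length : Int) - 1) 1).foldl
      (fun found i =>
        found || (PySem.List.pyGet? recent i == PySem.List.pyGet? recent (i + 1))) false
      = pvAdj recent := by
  rw [PySem.List.pyRange_one]
  rw [List.foldl_map]
  have hn : (((recent.length : Int) - 1) - 0).toNat = recent.length - 1 := by omega
  rw [hn]
  rw [pvFoldl_or (fun k => PySem.List.pyGet? recent ((0 : Int) + k) ==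
        PySem.List.pyGet? recent (((0 : Int) + k) + 1))]
  rw [Bool.false_or]
  have hf : (fun k : Nat => PySem.List.pyGet? recent ((0 : Int) + k) ==
        PySem.List.pyGet? recent (((0 : Int) + k) + 1))
      = (fun k : Nat => recent[k]? == recent[k + 1]?) := by
    funext k
    have h2 : ((k : Int) + 1) = (((k + 1 : Nat)) : Int) := by push_cast; ring
    have h1 : ((0 : Int) + (k : Int)) = ((k : Nat) : Int) := by ring
    rw [h1, h2, PySem.List.pyGet?_natCast, PySem.List.pyGet?_natCast]
  rw [hf, pvAdj_index]

-- B's runs loop: length of the stack after folding l over a nonempty acc with top prev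
theorem pvRunsLoop_eq (l : List String) (acc : List String) (prev : String)
    (h : PySem.List.pyGet? acc (-1) = some prev) :
    (l.foldl (fun runs x =>
        if runs.isEmpty || !(PySem.List.pyGet? runs (-1) == some x)
        then runs ++ [x] else runs) acc).length
      = acc.length + pvRuns prev l := by
  induction l generalizing acc prev with
  | nil => simp [pvRuns]
  | cons x t ih =>
    have hne : acc.isEmpty = false := by
      cases acc with
      | nil => simp [PySem.List.pyGet?] at h
      | cons a as => simp
    simp only [List.foldl_cons, hne, Bool.false_or]
    by_cases hx : x == prev
    · have hxp : x = prev := beq_iff_eq.mp hx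
      subst hxp
      simp only [h, beq_self_eq_true, Bool.not_true]
      rw [if_neg (by simp), ih acc x h]
      simp [pvRuns]
    · have : (PySem.List.pyGet? acc (-1) == some x) = false := by
        simp only [h]
        simp only [beq_eq_false_iff_ne, ne_eq, Option.some.injEq]
        intro e; exact hx (by simp [e])
      simp only [this, Bool.not_false, if_true]
      rw [ih (acc ++ [x]) x (PySem.List.pyGet?_neg_one_append_singleton acc x)]
      simp only [pvRuns, List.length_append, List.length_cons, List.length_nil]
      rw [if_neg hx]
      omega

theorem pvRuns_le (prev : String) (l : List String) : pvRuns prev l ≤ l.length := by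
  induction l generalizing prev with
  | nil => simp [pvRuns]
  | cons x t ih =>
    simp only [pvRuns, List.length_cons]
    have := ih x
    by_cases h : x == prev <;> simp [h] <;> omega

theorem pvRuns_adj (l : List String) (prev : String) :
    pvAdj (prev :: l) = decide (pvRuns prev l < l.length) := by
  induction l generalizing prev with
  | nil => simp [pvAdj, pvRuns]
  | cons x t ih =>
    simp only [pvAdj, pvRuns, List.length_cons]
    by_cases h : x == prev
    · have e : x = prev := beq_iff_eq.mp h
      subst e
      have hle := pvRuns_le x t
      simp only [beq_self_eq_true, Bool.true_or]
      symm
      simp only [decide_eq_true_iff]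
      rw [if_pos trivial]
      omega
    · have hp : (prev == x) = false := by
        simp only [beq_eq_false_iff_ne, ne_eq]
        intro e; exact h (by simp [e])
      simp only [hp, Bool.false_or, h, ih x]
      rw [if_neg (by simp)]
      simp only [decide_eq_decide]
      omega

-- B equals the adjacent scan of what it collects
theorem pvAlt_adj (recent : List String) :
    decide ((recent.foldl (fun runs x =>
        if runs.isEmpty || !(PySem.List.pyGet? runs (-1) == some x)
        then runs ++ [x] else runs) []).length < recent.length)
      = pvAdj recent := by
  cases recent with
  | nil => simp [pvAdj]
  | cons x t =>
    simp only [List.foldl_cons, List.isEmpty_nil, Bool.true_or, if_true, List.nil_append]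
    rw [pvRunsLoop_eq t [x] x (by simp [PySem.List.pyGet?_neg_one])]
    rw [pvRuns_adj t x]
    simp only [List.length_cons, List.length_nil, decide_eq_decide]
    omega

-- the two comprehension/loop builds collect the same list
theorem pvCollect_filterMap (l : List (List (String × String))) :
    l.filterMap (fun m => if m.lookup "sender" == some "user"
        then some (PySem.Str.slice ((m.lookup "content").getD "") none (some 50)) else none)
      = pvCollect l := rfl

theorem pvAdj_short (l : List String) (h : l.length ≤ 1) : pvAdj l = false := by
  match l with
  | [] => rfl
  | [a] => rfl

-- ===== VERDICT (by name: the statement is the Claim_ definition above) =====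
theorem check_repetitive_question_spec : Claim_equal_check_repetitive_question := by
  intro messages _
  unfold Spec_check_repetitive_question check_repetitive_question check_repetitive_question_alt
  rw [pvCollect_filterMap, pvAlt_adj]
  by_cases h : messages.length < 2
  · simp only [h, ite_true]
    rw [PySem.List.slice_from_neg_ofNat messages 10 (by omega)]
    symm
    apply pvAdj_short
    have h1 : (messages.drop (messages.length - 10)).length
        = messages.length - (messages.length - 10) := by simp
    have h2 : (pvCollect (messages.drop (messages.length - 10))).length
        ≤ (messages.drop (messages.length - 10)).length := by
      unfold pvCollect
      exact List.length_filterMap_le _ _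
    omega
  · rw [if_neg h, pvCollect_foldl, List.nil_append, pvScan_eq]
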